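-- pv_equiv track=rewrite | github.com/pypi-data/pypi-mirror-382 | packages/norvelang/norvelang-0.2.1-py3-none-any.whl/norve/interpreter/backend/column_utils.py | _try_fallback_patterns
-- ===== SOURCE A (Python) =====
-- from typing import List, Optional
--
-- def _try_fallback_patterns(requested: str, row_keys: List[str]) -> Optional[str]:
--     """Try additional fallback matching patterns."""
--     # Pattern 1: keys ending with requested name
--     matches = [k for k in row_keys if k.endswith(f".{requested}")]
--     if len(matches) == 1:
--         return matches[0]
--
--     # Pattern 2: case-insensitive exact match
--     matches = [k for k in row_keys if k.lower() == requested.lower()]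
--     if len(matches) == 1:
--         return matches[0]
--
--     # Pattern 3: keys containing the requested string
--     matches = [k for k in row_keys if requested in k]
--     if len(matches) == 1:
--         return matches[0]
--
--     # Pattern 4: case-insensitive fallback (first match)
--     for k in row_keys:
--         if k.lower() == requested.lower():
--             return k
--
--     # Pattern 5: return first match from previous search
--     if matches:
--         return matches[0]
--
--     return None
-- ===== SOURCE B (Python) =====
-- from typing import List, Optional
--
-- def _try_fallback_patterns(requested: str, row_keys: List[str]) -> Optional[str]:
--     """Streaming pass keeping only (count, first-match) per pattern, then a
--     table-driven decision: first pattern with a unique match, else first of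
--     the last two patterns with any match."""
--     suffix = "." + requested
--     low = requested.lower()
--     stats = [[0, None], [0, None], [0, None]]  # ends-with, case-insensitive, contains
--     for k in row_keys:
--         for st, hit in zip(stats, (k.endswith(suffix), k.lower() == low, requested in k)):
--             if hit:
--                 if st[0] == 0:
--                     st[1] = k
--                 st[0] += 1
--     for cnt, first in stats:
--         if cnt == 1:
--             return first
--     for cnt, first in stats[1:]:
--         if cnt:
--             return first
--     return None
-- ===== Notes on version B (the rewrite author's own statement) =====
-- stated objective: alternative
-- what changed: Instead of A's staged scans that build explicit match lists and a separate pattern-4 loop, B does one streaming pass maintaining only a (count, first-match) pair per pattern in a table, then decides with two generic loops over that table (first unique count, then first nonzero count among the last two); no intermediate lists, and the suffix and requested.lower() are computed once instead of per key.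
import Mathlib
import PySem

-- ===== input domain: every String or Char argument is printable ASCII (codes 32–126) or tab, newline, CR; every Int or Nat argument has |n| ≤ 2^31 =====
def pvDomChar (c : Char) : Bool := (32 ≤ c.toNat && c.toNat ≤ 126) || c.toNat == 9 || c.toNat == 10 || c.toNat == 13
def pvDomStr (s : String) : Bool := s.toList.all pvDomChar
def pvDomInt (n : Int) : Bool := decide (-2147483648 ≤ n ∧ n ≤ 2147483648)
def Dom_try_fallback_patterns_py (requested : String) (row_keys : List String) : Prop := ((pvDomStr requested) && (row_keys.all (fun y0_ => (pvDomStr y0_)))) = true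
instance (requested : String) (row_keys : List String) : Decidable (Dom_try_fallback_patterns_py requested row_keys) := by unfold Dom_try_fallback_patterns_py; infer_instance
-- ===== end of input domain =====

-- B replaces A's staged list-building scans with one streaming pass keeping only
-- (count, first-match) per pattern and a table-driven decision (objective: alternative).

-- ===== PORT A =====
-- Pattern 4 of A: explicit loop returning the first case-insensitive match.
def pattern4Loop (requested : String) : List String → Option String
  | [] => none
  | k :: rest =>
      if PySem.Str.lower k == PySem.Str.lower requested then some k
      else pattern4Loop requested rest

def try_fallback_patterns_py (requested : String) (row_keys : List String) : Option String :=
  -- Pattern 1: keys ending with ".requested"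
  let m1 := row_keys.filter (fun k => PySem.Str.endswith k ("." ++ requested))
  if m1.length = 1 then m1.head?
  else
    -- Pattern 2: case-insensitive exact match
    let m2 := row_keys.filter (fun k => PySem.Str.lower k == PySem.Str.lower requested)
    if m2.length = 1 then m2.head?
    else
      -- Pattern 3: keys containing the requested string
      let m3 := row_keys.filter (fun k => PySem.Str.isIn requested k)
      if m3.length = 1 then m3.head?
      else
        -- Pattern 4: loop for the first case-insensitive match
        match pattern4Loop requested row_keys with
        | some k => some k
        -- Pattern 5: first element of the last `matches` list, if any
        | none => m3.head?

-- ===== PORT B =====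
-- update one (count, first) stat with one key
def updStat (k : String) (hit : Bool) (st : Nat × Option String) : Nat × Option String :=
  if hit then (st.1 + 1, if st.1 = 0 then some k else st.2) else st

-- first stat whose count is exactly 1 (Python's `for cnt, first in stats: if cnt == 1`)
def uniqueLoop : List (Nat × Option String) → Option (Option String)
  | [] => none
  | (c, f) :: rest => if c = 1 then some f else uniqueLoop rest

-- first stat whose count is nonzero (Python's `for cnt, first in stats[1:]: if cnt`)
def someLoop : List (Nat × Option String) → Option (Option String)
  | [] => none
  | (c, f) :: rest => if c ≠ 0 then some f else someLoop rest

def try_fallback_patterns_py_alt (requested : String) (row_keys : List String) : Option String :=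
  let suffix := "." ++ requested
  let low := PySem.Str.lower requested
  let stats := row_keys.foldl
    (fun (st : (Nat × Option String) × (Nat × Option String) × (Nat × Option String)) k =>
      (updStat k (PySem.Str.endswith k suffix) st.1,
       updStat k (PySem.Str.lower k == low) st.2.1,
       updStat k (PySem.Str.isIn requested k) st.2.2))
    ((0, none), (0, none), (0, none))
  let statsList := [stats.1, stats.2.1, stats.2.2]
  match uniqueLoop statsList with
  | some r => r
  | none =>
      match someLoop (statsList.drop 1) with
      | some r => r
      | none => none

-- ===== PRECONDITION & SPEC =====
def Spec_try_fallback_patterns_py (requested : String) (row_keys : List String) (out : Option String) : Prop := out = try_fallback_patterns_py_alt requested row_keys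
instance (requested : String) (row_keys : List String) (out : Option String) : Decidable (Spec_try_fallback_patterns_py requested row_keys out) := by unfold Spec_try_fallback_patterns_py; infer_instance

-- ===== CLAIM =====
def Claim_equal_try_fallback_patterns_py : Prop := ∀ (requested : String) (row_keys : List String), Dom_try_fallback_patterns_py requested row_keys → Spec_try_fallback_patterns_py requested row_keys (try_fallback_patterns_py requested row_keys)

-- ===== LEMMAS AND PROOFS =====

-- the fold computes, per pattern, the length and head of the corresponding filtered list
theorem fold_stats (p q r : String → Bool) (l : List String)
    (a b c : Nat × Option String) :
    l.foldl
      (fun (st : (Nat × Option String) × (Nat × Option String) × (Nat × Option String)) k =>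
        (updStat k (p k) st.1, updStat k (q k) st.2.1, updStat k (r k) st.2.2))
      (a, b, c)
      = ((a.1 + (l.filter p).length, if a.1 = 0 then ((l.filter p).head?).orElse (fun _ => a.2) else a.2),
         (b.1 + (l.filter q).length, if b.1 = 0 then ((l.filter q).head?).orElse (fun _ => b.2) else b.2),
         (c.1 + (l.filter r).length, if c.1 = 0 then ((l.filter r).head?).orElse (fun _ => c.2) else c.2)) := by
  induction l generalizing a b c with
  | nil => simp
  | cons k rest ih =>
      simp only [List.foldl_cons, List.filter_cons]
      rw [ih]
      by_cases hp : p k <;> by_cases hq : q k <;> by_cases hr : r k <;>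
        simp [updStat, hp, hq, hr, Option.orElse] <;> omega

-- A's explicit Pattern-4 loop returns the head of the filtered list.
theorem pattern4Loop_eq_head (requested : String) (l : List String) :
    pattern4Loop requested l
      = (l.filter (fun k => PySem.Str.lower k == PySem.Str.lower requested)).head? := by
  induction l with
  | nil => rfl
  | cons k rest ih =>
      by_cases h : (PySem.Str.lower k == PySem.Str.lower requested)
      · simp [pattern4Loop, h]
      · simp [pattern4Loop, h, ih]

-- ===== VERDICT =====
theorem try_fallback_patterns_py_spec : Claim_equal_try_fallback_patterns_py := by
  intro requested row_keys _
  unfold Spec_try_fallback_patterns_py try_fallback_patterns_py try_fallback_patterns_py_alt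
  simp only [fold_stats, Nat.zero_add, Option.orElse]
  set m1 := row_keys.filter (fun k => PySem.Str.endswith k ("." ++ requested)) with hm1
  set m2 := row_keys.filter (fun k => PySem.Str.lower k == PySem.Str.lower requested) with hm2
  set m3 := row_keys.filter (fun k => PySem.Str.isIn requested k) with hm3
  by_cases h1 : m1.length = 1
  · simp only [uniqueLoop, h1]
    cases m1.head? <;> rfl
  · by_cases h2 : m2.length = 1
    · simp only [uniqueLoop, h1, h2]
      cases m2.head? <;> rfl
    · by_cases h3 : m3.length = 1
      · simp only [uniqueLoop, h1, h2, h3]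
        cases m3.head? <;> rfl
      · simp only [h1, h2, h3, if_false]
        rw [pattern4Loop_eq_head, ← hm2]
        simp only [uniqueLoop, h1, h2, h3]
        by_cases hc2 : m2.length = 0
        · have : m2 = [] := List.length_eq_zero_iff.mp hc2
          by_cases hc3 : m3.length = 0
          · have h3e : m3 = [] := List.length_eq_zero_iff.mp hc3
            simp [this, h3e, someLoop]
          · simp [this, someLoop, hc3]
            cases m3.head? <;> rfl
        · cases hm : m2 with
          | nil => simp [hm] at hc2
          | cons x t => simp [someLoop]
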